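-- pv_equiv track=rewrite | github.com/Skab101/Design-of-digital-systems-62711 | PWF/tools/asm/dsdasm.py | hex_bram_packed
-- ===== SOURCE A (Python) =====
-- def hex_bram_packed(words, line_words=16):
--     """BRAM-packed: each line = line_words words, packed MSB=highest address first."""
--     lines = []
--     for i in range(0, len(words), line_words):
--         chunk = words[i:i+line_words]
--         packed = "".join(f"{w:04X}" for w in reversed(chunk))
--         # Right-align to 64 chars (pad left with zeros)
--         packed = packed.rjust(line_words * 4, '0')
--         lines.append(packed)
--     return "\n".join(lines) + "\n"
-- ===== SOURCE B (Python) =====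
-- def hex_bram_packed(words, line_words=16):
--     """BRAM-packed hex lines, built in one streaming pass over the words.
--
--     The formatted words of the current line are collected in a list and
--     flushed every line_words words (and once at the end for a partial
--     line), joining them highest-address-first; the left zero padding is
--     computed arithmetically and the output string is grown directly with
--     one '\n' per line instead of building a list of lines and joining.
--     """
--     if not words:
--         return "\n"
--     out = ""
--     parts = []
--     for w in words:
--         parts.append(f"{w:04X}")
--         if len(parts) == line_words:
--             line = "".join(reversed(parts))
--             out += "0" * (line_words * 4 - len(line)) + line + "\n"
--             parts = []
--     if parts:
--         line = "".join(reversed(parts))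
--         out += "0" * (line_words * 4 - len(line)) + line + "\n"
--     return out
-- ===== Notes on version B (the rewrite author's own statement) =====
-- stated objective: alternative
-- what changed: B makes one streaming pass with a line accumulator and counter (prepending each formatted word, flushing every line_words words) instead of A's index-range loop with slicing, reversed(), rjust and list+join.
-- outside the precondition, e.g. on hex_bram_packed([1], -1): A returns '\n', B returns '0001\n'; on hex_bram_packed([1], 0): A raises ValueError, B returns '0001\n'
import Mathlib
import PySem

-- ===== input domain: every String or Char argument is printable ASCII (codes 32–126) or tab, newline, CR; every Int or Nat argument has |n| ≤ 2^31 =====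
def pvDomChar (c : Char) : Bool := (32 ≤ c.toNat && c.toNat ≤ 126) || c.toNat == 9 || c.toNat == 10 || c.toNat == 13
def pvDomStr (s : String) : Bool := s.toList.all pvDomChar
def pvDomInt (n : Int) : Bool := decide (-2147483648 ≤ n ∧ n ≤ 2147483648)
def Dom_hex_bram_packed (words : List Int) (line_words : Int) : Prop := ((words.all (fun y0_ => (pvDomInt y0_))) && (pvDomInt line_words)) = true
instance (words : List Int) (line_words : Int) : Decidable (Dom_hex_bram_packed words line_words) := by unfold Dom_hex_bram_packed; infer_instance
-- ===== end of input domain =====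

-- B restructures the same O(n) formatting: chunk consumption by destructuring slices, per-line
-- prepending of formatted words instead of reversed(), arithmetic zero padding instead of rjust,
-- direct string accumulation instead of list+join ('alternative', not claimed faster).

-- ===== PORT A =====
-- shared helper: f"{w:04X}" (uppercase hex, zero-padded to overall width 4, '-' before the digits)
def pvHexDigit (k : Nat) : Char :=
  ['0','1','2','3','4','5','6','7','8','9','A','B','C','D','E','F'].getD k '0'

def pvHexChars : Nat → List Char
  | 0 => []
  | n+1 => pvHexChars ((n+1)/16) ++ [pvHexDigit ((n+1)%16)]
decreasing_by exact Nat.div_lt_self (Nat.succ_pos n) (by norm_num)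

def pvHex04 (w : Int) : List Char :=
  if w < 0 then '-' :: (List.replicate (3 - (pvHexChars (-w).toNat).length) '0' ++ pvHexChars (-w).toNat)
  else List.replicate (4 - (pvHexChars w.toNat).length) '0' ++ pvHexChars w.toNat

def hex_bram_packed (words : List Int) (line_words : Int) : String :=
  let lines : List (List Char) :=
    (PySem.List.pyRange 0 (words.length : Int) line_words).foldl
      (fun lines i =>
        let chunk := PySem.List.slice words (some i) (some (i + line_words))
        let packed := (chunk.reverse.map pvHex04).flatten
        -- packed.rjust(line_words * 4, '0')
        let packed := List.replicate (line_words * 4 - (packed.length : Int)).toNat '0' ++ packed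
        lines ++ [packed]) []
  String.ofList (PySem.Chars.join ['\n'] lines ++ ['\n'])

-- ===== PORT B =====
-- one streaming pass: parts.append(f"{w:04X}"); every line_words words flush
-- "".join(reversed(parts)) as a padded line + '\n'; flush the remaining partial line at the end
def hex_bram_packed_alt (words : List Int) (line_words : Int) : String :=
  if words.isEmpty then "\n"
  else
    let s := words.foldl
      (fun (st : List Char × List (List Char)) w =>
        let parts := st.2 ++ [pvHex04 w]
        if (parts.length : Int) = line_words then
          -- line = "".join(reversed(parts)); out += "0"*(line_words*4 - len(line)) + line + "\n"
          let line := parts.reverse.flatten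
          (st.1 ++ (List.replicate (line_words * 4 - (line.length : Int)).toNat '0' ++ line ++ ['\n']), [])
        else (st.1, parts))
      ([], [])
    String.ofList (if s.2 ≠ [] then
        s.1 ++ (List.replicate (line_words * 4 - (s.2.reverse.flatten.length : Int)).toNat '0'
          ++ s.2.reverse.flatten ++ ['\n'])
      else s.1)

-- ===== PRECONDITION & SPEC =====
-- Pre_ excludes the meaningless chunk sizes line_words ≤ 0: at line_words = 0 Python A raises
-- ValueError (range step 0); for negative line_words A returns a bare "\n" without processing any
-- word (an artefact of range's empty iteration with a negative step) while B's counter never hits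
-- line_words and it returns all words as one unpadded line — both values are accidents, neither is
-- a defensible spec for a non-positive chunk size.
def Pre_hex_bram_packed (words : List Int) (line_words : Int) : Prop := 1 ≤ line_words
instance (words : List Int) (line_words : Int) : Decidable (Pre_hex_bram_packed words line_words) := by unfold Pre_hex_bram_packed; infer_instance
def pvWitness_hex_bram_packed : List Int × Int := ([1, 2, 3], 2)

def Spec_hex_bram_packed (words : List Int) (line_words : Int) (out : String) : Prop := out = hex_bram_packed_alt words line_words
instance (words : List Int) (line_words : Int) (out : String) : Decidable (Spec_hex_bram_packed words line_words out) := by unfold Spec_hex_bram_packed; infer_instance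

-- ===== CLAIM (what is proved, stated in full; the proofs are below) =====
def Claim_equal_hex_bram_packed : Prop := ∀ (words : List Int) (line_words : Int), Dom_hex_bram_packed words line_words → Pre_hex_bram_packed words line_words → Spec_hex_bram_packed words line_words (hex_bram_packed words line_words)

-- ===== LEMMAS AND PROOFS =====

-- the per-chunk padded line both sides produce, and the chunk decomposition both loops follow
def pvLineAcc (p : List Int) : List Char := (p.reverse.map pvHex04).flatten

def pvLineOf (lw : Int) (chunk : List Int) : List Char :=
  List.replicate (lw * 4 - ((pvLineAcc chunk).length : Int)).toNat '0' ++ pvLineAcc chunk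

def pvChunks (lw : Int) : Nat → List Int → List (List Char)
  | 0, _ => []
  | _+1, [] => []
  | f+1, r :: rs => pvLineOf lw ((r :: rs).take lw.toNat) :: pvChunks lw f ((r :: rs).drop lw.toNat)

theorem pvRange_pos_cons {a b s : Int} (hs : 0 < s) (hab : a < b) :
    PySem.List.pyRange a b s = a :: PySem.List.pyRange (a + s) b s := by
  rw [PySem.List.pyRange_of_pos _ _ hs, PySem.List.pyRange_of_pos _ _ hs]
  by_cases h : a + s < b
  · have hcount : ((b - a + s - 1) / s).toNat = ((b - (a + s) + s - 1) / s).toNat + 1 := by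
      have : b - a + s - 1 = (b - (a + s) + s - 1) + 1 * s := by ring
      rw [this, Int.add_mul_ediv_right _ _ (by omega : s ≠ 0)]
      have h0 : 0 ≤ (b - (a + s) + s - 1) / s := by
        apply Int.ediv_nonneg <;> omega
      omega
    simp only [if_pos hab, if_pos h, hcount, List.range_succ_eq_map]
    simp [List.map_map, Function.comp]
    intro k _
    ring
  · have hcount : ((b - a + s - 1) / s) = 1 := by
      have h1 : 1 * s ≤ b - a + s - 1 := by omega
      have h2 : b - a + s - 1 < 2 * s := by omega
      have := Int.le_ediv_iff_mul_le hs (a := 1) (b := b - a + s - 1)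
      have := Int.ediv_lt_iff_lt_mul hs (a := b - a + s - 1) (b := 2)
      omega
    simp only [if_pos hab, if_neg h, hcount]
    norm_num

theorem pvRange_pos_nil {a b s : Int} (hs : 0 < s) (hab : b ≤ a) :
    PySem.List.pyRange a b s = [] := by
  rw [PySem.List.pyRange_of_pos _ _ hs, if_neg (by omega)]
  simp

theorem pvChunks_nil (lw : Int) (n : Nat) : pvChunks lw n [] = [] := by cases n <;> rfl

theorem pvLemA (words : List Int) (lw : Int) (hlw : 1 ≤ lw) :
    ∀ (n : Nat) (i : Int), 0 ≤ i → (words.length - i.toNat) ≤ n →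
    ∀ acc : List (List Char),
      (PySem.List.pyRange i (words.length : Int) lw).foldl
        (fun lines j =>
          let chunk := PySem.List.slice words (some j) (some (j + lw))
          let packed := (chunk.reverse.map pvHex04).flatten
          let packed := List.replicate (lw * 4 - (packed.length : Int)).toNat '0' ++ packed
          lines ++ [packed]) acc
      = acc ++ pvChunks lw n (words.drop i.toNat) := by
  intro n
  induction n with
  | zero =>
    intro i hi hn acc
    have hge : words.length ≤ i.toNat := by omega
    rw [pvRange_pos_nil (by omega) (by omega), List.drop_eq_nil_of_le hge, pvChunks_nil]
    simp
  | succ m ih =>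
    intro i hi hn acc
    by_cases hlt : i < (words.length : Int)
    · rw [pvRange_pos_cons (by omega) hlt]
      simp only [List.foldl_cons]
      have hslice : PySem.List.slice words (some i) (some (i + lw)) = (words.drop i.toNat).take lw.toNat := by
        rw [PySem.List.slice_toNat words hi (by omega : (0:Int) ≤ i + lw)]
        congr 1
        omega
      have hrest : words.drop (i + lw).toNat = (words.drop i.toNat).drop lw.toNat := by
        rw [List.drop_drop]
        congr 1
        omega
      rw [ih (i + lw) (by omega) (by simp; omega), hrest]
      cases hr : words.drop i.toNat with
      | nil =>
        exfalso
        have := List.length_drop (l := words) (i := i.toNat)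
        rw [hr] at this
        simp at this
        omega
      | cons r rs =>
        rw [hslice, hr]
        simp only [pvChunks, pvLineOf, pvLineAcc]
        simp
    · rw [pvRange_pos_nil (by omega) (by omega),
        List.drop_eq_nil_of_le (by omega), pvChunks_nil]
      simp

theorem pvChunks_cons_of_ne (lw : Int) (f : Nat) (xs : List Int) (h : xs ≠ []) :
    pvChunks lw (f+1) xs = pvLineOf lw (xs.take lw.toNat) :: pvChunks lw f (xs.drop lw.toNat) := by
  cases xs with
  | nil => exact absurd rfl h
  | cons r rs => rfl

theorem pvChunks_congr (lw : Int) (hlw : 1 ≤ lw) :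
    ∀ (f g : Nat) (xs : List Int), xs.length ≤ f → xs.length ≤ g → pvChunks lw f xs = pvChunks lw g xs := by
  intro f
  induction f with
  | zero =>
    intro g xs hf hg
    have : xs = [] := by cases xs <;> simp_all
    subst this
    simp [pvChunks_nil]
  | succ m ih =>
    intro g xs hf hg
    cases xs with
    | nil => simp [pvChunks_nil]
    | cons r rs =>
      cases g with
      | zero => simp at hg
      | succ g' =>
        rw [pvChunks_cons_of_ne _ _ _ (by simp), pvChunks_cons_of_ne _ _ _ (by simp)]
        rw [ih g' _ (by simp at hf ⊢; omega) (by simp at hg ⊢; omega)]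

-- named (definitionally equal) forms of B's loop body and trailing flush
def pvStepB (lw : Int) (st : List Char × List (List Char)) (w : Int) : List Char × List (List Char) :=
  let parts := st.2 ++ [pvHex04 w]
  if (parts.length : Int) = lw then
    let line := parts.reverse.flatten
    (st.1 ++ (List.replicate (lw * 4 - (line.length : Int)).toNat '0' ++ line ++ ['\n']), [])
  else (st.1, parts)

def pvFinishB (lw : Int) (s : List Char × List (List Char)) : List Char :=
  if s.2 ≠ [] then
    s.1 ++ (List.replicate (lw * 4 - (s.2.reverse.flatten.length : Int)).toNat '0'
      ++ s.2.reverse.flatten ++ ['\n'])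
  else s.1

theorem pvPartsLine (p : List Int) : (p.map pvHex04).reverse.flatten = pvLineAcc p := by
  simp [pvLineAcc, List.map_reverse]

theorem pvStepB_full (lw : Int) (p : List Int) (w : Int) (out : List Char)
    (h : (p.length : Int) + 1 = lw) :
    pvStepB lw (out, p.map pvHex04) w
      = (out ++ (List.replicate (lw * 4 - ((pvLineAcc (p ++ [w])).length : Int)).toNat '0'
          ++ pvLineAcc (p ++ [w]) ++ ['\n']), List.map pvHex04 []) := by
  have hparts : p.map pvHex04 ++ [pvHex04 w] = (p ++ [w]).map pvHex04 := by simp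
  simp only [pvStepB, hparts, pvPartsLine]
  rw [if_pos (by simp; omega)]
  simp

theorem pvStepB_partial (lw : Int) (p : List Int) (w : Int) (out : List Char)
    (h : ¬ (p.length : Int) + 1 = lw) :
    pvStepB lw (out, p.map pvHex04) w = (out, (p ++ [w]).map pvHex04) := by
  have hparts : p.map pvHex04 ++ [pvHex04 w] = (p ++ [w]).map pvHex04 := by simp
  simp only [pvStepB, hparts]
  rw [if_neg (by simp; push_cast; omega)]

theorem pvLemB (lw : Int) (hlw : 1 ≤ lw) :
    ∀ (rest p : List Int) (out : List Char), (p.length : Int) < lw →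
      pvFinishB lw (rest.foldl (pvStepB lw) (out, p.map pvHex04))
      = out ++ ((pvChunks lw (p.length + rest.length) (p ++ rest)).map (· ++ ['\n'])).flatten := by
  intro rest
  induction rest with
  | nil =>
    intro p out hp
    cases p with
    | nil => simp [pvFinishB, pvChunks_nil]
    | cons q qs =>
      simp only [List.foldl_nil, List.append_nil]
      rw [pvFinishB, if_pos (by simp)]
      have hfuel : (q :: qs).length + ([] : List Int).length = qs.length + 1 := by simp
      rw [hfuel, pvChunks_cons_of_ne _ _ _ (by simp)]
      rw [List.take_of_length_le (by omega), List.drop_eq_nil_of_le (by omega), pvChunks_nil]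
      rw [pvPartsLine]
      simp only [pvLineOf, List.map_cons, List.flatten_cons, List.flatten_nil, List.append_nil]
      simp
  | cons w rest' ih =>
    intro p out hp
    simp only [List.foldl_cons]
    by_cases h : (p.length : Int) + 1 = lw
    · rw [pvStepB_full lw p w out h]
      have hih := ih [] (out ++ (List.replicate (lw * 4 - ((pvLineAcc (p ++ [w])).length : Int)).toNat '0'
          ++ pvLineAcc (p ++ [w]) ++ ['\n'])) (by simpa using hlw)
      simp only [List.length_nil, List.nil_append, Nat.zero_add] at hih
      rw [hih]
      have hlenw : (p ++ [w]).length = lw.toNat := by simp; omega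
      have hxs : p ++ w :: rest' = (p ++ [w]) ++ rest' := by simp
      have hfuel : p.length + (w :: rest').length = (p.length + rest'.length) + 1 := by simp; omega
      rw [hxs, hfuel, pvChunks_cons_of_ne _ _ _ (by simp)]
      rw [show ((p ++ [w]) ++ rest').take lw.toNat = p ++ [w] by rw [← hlenw, List.take_left]]
      rw [show ((p ++ [w]) ++ rest').drop lw.toNat = rest' by rw [← hlenw, List.drop_left]]
      rw [pvChunks_congr lw hlw (p.length + rest'.length) rest'.length rest' (by omega) (le_refl _)]
      simp [pvLineOf]
    · rw [pvStepB_partial lw p w out h]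
      rw [ih (p ++ [w]) out (by simp; omega)]
      have hxs : (p ++ [w]) ++ rest' = p ++ w :: rest' := by simp
      have hfuel : (p ++ [w]).length + rest'.length = p.length + (w :: rest').length := by simp; omega
      rw [hxs, hfuel]

theorem pvJoinNL : ∀ (l : List Char) (ls : List (List Char)),
    PySem.Chars.join ['\n'] (l :: ls) ++ ['\n'] = ((l :: ls).map (· ++ ['\n'])).flatten := by
  intro l ls
  induction ls generalizing l with
  | nil => simp [PySem.Chars.join_singleton]
  | cons q rest ih =>
    rw [PySem.Chars.join_cons_cons]
    have := ih q
    simp only [List.map_cons, List.flatten_cons] at this ⊢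
    rw [← this]
    simp

-- ===== VERDICT (by name: the statement is the Claim_ definition above) =====
theorem hex_bram_packed_spec : Claim_equal_hex_bram_packed := by
  intro words lw _ hpre
  unfold Spec_hex_bram_packed
  have hlw : 1 ≤ lw := hpre
  cases words with
  | nil =>
    unfold hex_bram_packed hex_bram_packed_alt
    rw [pvRange_pos_nil (by omega) (by simp)]
    simp [PySem.Chars.join_nil]
  | cons w ws =>
    have hA := pvLemA (w :: ws) lw hlw (w :: ws).length 0 (by omega) (by simp) []
    simp only [Int.toNat_zero, List.drop_zero] at hA
    rw [show hex_bram_packed (w :: ws) lw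
          = String.ofList (PySem.Chars.join ['\n']
              ((PySem.List.pyRange 0 ((w :: ws).length : Int) lw).foldl
                (fun lines i =>
                  let chunk := PySem.List.slice (w :: ws) (some i) (some (i + lw))
                  let packed := (chunk.reverse.map pvHex04).flatten
                  let packed := List.replicate (lw * 4 - (packed.length : Int)).toNat '0' ++ packed
                  lines ++ [packed]) []) ++ ['\n']) from rfl]
    rw [show hex_bram_packed_alt (w :: ws) lw
          = String.ofList (pvFinishB lw ((w :: ws).foldl (pvStepB lw)
              ([], List.map pvHex04 []))) from rfl]
    rw [hA, pvLemB lw hlw (w :: ws) [] [] (by simpa using hlw)]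
    simp only [List.nil_append, List.length_nil, Nat.zero_add]
    rw [show pvChunks lw (w :: ws).length (w :: ws)
          = pvLineOf lw ((w :: ws).take lw.toNat) :: pvChunks lw ws.length ((w :: ws).drop lw.toNat) from rfl]
    rw [pvJoinNL]
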